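-- pv_equiv track=rewrite | github.com/Manshi-M/HackerRank | Dynamic Programming/Sam and substrings/solution.py | substrings
-- ===== SOURCE A (Python) =====
-- def substrings(n):
--     l=len(n)
--     res = 0;
--     f = 1;
--     MOD = (pow(10,9)+7)
--     for i in range(l-1,-1,-1):
--         res = (res + (int(n[i])-int('0'))*f*(i+1)) % MOD
--         f = (f*10+1) % MOD
--     return res
-- ===== SOURCE B (Python) =====
-- def substrings(n):
--     MOD = 10 ** 9 + 7
--     f = 0      # sum of values of all substrings ending at the current index (mod MOD)
--     total = 0
--     for i, c in enumerate(n):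
--         f = (10 * f + (i + 1) * int(c)) % MOD
--         total = (total + f) % MOD
--     return total
-- ===== Notes on version B (the rewrite author's own statement) =====
-- stated objective: alternative
-- what changed: B scans the digits left-to-right with a prefix DP (f = sum of all substrings ending at the current index, updated f = 10*f + (i+1)*digit) instead of A's right-to-left scan with a growing repunit place-value factor.
import Mathlib
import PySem

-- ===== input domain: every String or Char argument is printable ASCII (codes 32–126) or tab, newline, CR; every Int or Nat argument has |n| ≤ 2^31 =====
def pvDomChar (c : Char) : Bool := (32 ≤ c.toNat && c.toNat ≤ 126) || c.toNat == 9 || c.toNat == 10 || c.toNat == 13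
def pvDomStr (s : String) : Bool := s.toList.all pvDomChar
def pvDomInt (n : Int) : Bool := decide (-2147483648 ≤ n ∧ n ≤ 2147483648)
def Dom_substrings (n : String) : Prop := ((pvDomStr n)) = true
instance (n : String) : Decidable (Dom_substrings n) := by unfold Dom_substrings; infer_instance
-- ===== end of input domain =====

-- B replaces A's right-to-left repunit place-value scan by a left-to-right prefix-DP
-- (f = sum of all substrings ending at the current index); alternative decomposition, same O(n) cost.


-- ===== PORT A =====
-- int(c) for a one-character string c; the `.getD 0` default is never reached under Pre_
-- (every character is a digit, so `PySem.Int.ofChars?` returns `some`).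
def pyIntChar (c : Char) : Int := (PySem.Int.ofChars? [c]).getD 0

def substrings (n : String) : Int :=
  let l : Int := PySem.Str.len n
  let MOD : Int := 10 ^ 9 + 7
  let st := (PySem.List.pyRange (l - 1) (-1) (-1)).foldl
    (fun (st : Int × Int) (i : Int) =>
      -- res = (res + (int(n[i]) - int('0')) * f * (i+1)) % MOD ; f = (f*10+1) % MOD
      let d := ((PySem.Str.pyGet? n i).map pyIntChar).getD 0  -- n[i] never raises here: i ∈ range(l)
      (PySem.Int.mod (st.1 + (d - pyIntChar '0') * st.2 * (i + 1)) MOD,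
       PySem.Int.mod (st.2 * 10 + 1) MOD))
    (0, 1)
  st.1

-- ===== PORT B =====
def substrings_alt (n : String) : Int :=
  let MOD : Int := 10 ^ 9 + 7
  let st := (PySem.List.enumerate n.toList 0).foldl
    (fun (st : Int × Int) (p : Int × Char) =>
      -- f = (10*f + (i+1)*int(c)) % MOD ; total = (total + f) % MOD
      let f := PySem.Int.mod (10 * st.1 + (p.1 + 1) * pyIntChar p.2) MOD
      (f, PySem.Int.mod (st.2 + f) MOD))
    (0, 0)
  st.2

-- ===== PRECONDITION & SPEC =====
-- Pre_ excludes exactly the strings containing a non-digit character, on which Python's A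
-- raises ValueError at int(n[i]).
def Pre_substrings (n : String) : Prop := n.toList.all Char.isDigit = true
instance (n : String) : Decidable (Pre_substrings n) := by unfold Pre_substrings; infer_instance
def pvWitness_substrings : String := "10234"

def Spec_substrings (n : String) (out : Int) : Prop := out = substrings_alt n
instance (n : String) (out : Int) : Decidable (Spec_substrings n out) := by unfold Spec_substrings; infer_instance

-- ===== CLAIM (what is proved, stated in full; the proofs are below) =====
def Claim_equal_substrings : Prop := ∀ (n : String), Dom_substrings n → Pre_substrings n → Spec_substrings n (substrings n)

-- ===== LEMMAS AND PROOFS =====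

def pvM : Int := 10 ^ 9 + 7

-- A's loop, rephrased as structural recursion over the reversed character list (i = current index).
def aRec : List Char → Int → Int → Int → Int
  | [], _, res, _ => res
  | c :: cs, i, res, f =>
      aRec cs (i - 1) ((res + (pyIntChar c - pyIntChar '0') * f * (i + 1)) % pvM) ((f * 10 + 1) % pvM)

-- B's loop, rephrased as structural recursion over the character list (s = current index).
def bRec : List Char → Int → Int → Int → Int
  | [], _, _, total => total
  | c :: cs, s, f, total =>
      let f' := (10 * f + (s + 1) * pyIntChar c) % pvM
      bRec cs (s + 1) f' ((total + f') % pvM)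

-- pure (mod-free) value of A's loop
def aV : List Char → Int → Int → Int
  | [], _, _ => 0
  | c :: cs, i, f => (pyIntChar c - pyIntChar '0') * f * (i + 1) + aV cs (i - 1) (f * 10 + 1)

-- pure (mod-free) value of B's loop
def bV : List Char → Int → Int → Int
  | [], _, _ => 0
  | c :: cs, s, f => (10 * f + (s + 1) * pyIntChar c) + bV cs (s + 1) (10 * f + (s + 1) * pyIntChar c)

-- repunit-style growth of A's factor f
def upd : Nat → Int → Int
  | 0, f => f
  | k + 1, f => 10 * upd k f + 1

-- common closed form: Σ_j (s+j+1) * digit_j * upd (len-1-j) f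
def wSum : List Char → Int → Int → Int
  | [], _, _ => 0
  | c :: cs, s, f => (s + 1) * pyIntChar c * upd cs.length f + wSum cs (s + 1) f

theorem foldlA_aux (ds : List Char) : ∀ (res f : Int),
    ((PySem.List.pyRange ((ds.length : Int) - 1) (-1) (-1)).foldl
      (fun (st : Int × Int) (i : Int) =>
        (PySem.Int.mod (st.1 + ((((PySem.List.pyGet? ds i).map pyIntChar).getD 0) - pyIntChar '0') * st.2 * (i + 1)) (10 ^ 9 + 7),
         PySem.Int.mod (st.2 * 10 + 1) (10 ^ 9 + 7))) (res, f)).1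
      = aRec ds.reverse ((ds.length : Int) - 1) res f := by
  induction ds using List.reverseRecOn with
  | nil =>
      intro res f
      rw [PySem.List.pyRange_neg_one_eq_nil (by norm_num)]
      simp [aRec]
  | append_singleton xs x ih =>
      intro res f
      have hlen : ((xs ++ [x]).length : Int) - 1 = (xs.length : Int) := by
        simp
      rw [hlen]
      rw [PySem.List.pyRange_neg_one_cons (by omega)]
      rw [List.foldl_cons]
      rw [PySem.List.foldl_congr_mem _ _
        (fun (st : Int × Int) (i : Int) =>
          (PySem.Int.mod (st.1 + ((((PySem.List.pyGet? xs i).map pyIntChar).getD 0) - pyIntChar '0') * st.2 * (i + 1)) (10 ^ 9 + 7),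
           PySem.Int.mod (st.2 * 10 + 1) (10 ^ 9 + 7))) _ ?hcong]
      · rw [ih]
        rw [PySem.List.pyGet?_append_length]
        simp only [List.reverse_append, List.reverse_singleton, List.singleton_append, aRec,
          Option.map_some, Option.getD_some]
        rw [PySem.Int.mod_eq_emod_of_pos (by norm_num), PySem.Int.mod_eq_emod_of_pos (by norm_num)]
        rfl
      · intro acc i hi
        obtain ⟨h1, h2⟩ := PySem.List.mem_pyRange_neg_one.mp hi
        have h0 : 0 ≤ i := by omega
        have hk : i.toNat < xs.length := by omega
        simp only [PySem.List.pyGet?_of_nonneg _ h0, List.getElem?_append_left hk]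

theorem bridgeA (n : String) :
    substrings n = aRec n.toList.reverse ((n.toList.length : Int) - 1) 0 1 := by
  unfold substrings
  simp only [PySem.Str.len_eq, PySem.Str.pyGet?_eq, PySem.Chars.pyGet?_eq_listPyGet?]
  exact foldlA_aux n.toList 0 1

theorem foldlB_aux (cs : List Char) : ∀ (s f total : Int),
    ((PySem.List.enumerate cs s).foldl
      (fun (st : Int × Int) (p : Int × Char) =>
        (PySem.Int.mod (10 * st.1 + (p.1 + 1) * pyIntChar p.2) (10 ^ 9 + 7),
         PySem.Int.mod (st.2 + PySem.Int.mod (10 * st.1 + (p.1 + 1) * pyIntChar p.2) (10 ^ 9 + 7)) (10 ^ 9 + 7)))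
      (f, total)).2 = bRec cs s f total := by
  induction cs with
  | nil => intro s f total; simp [PySem.List.enumerate_nil, bRec]
  | cons c cs ih =>
      intro s f total
      rw [PySem.List.enumerate_cons, List.foldl_cons, ih]
      simp only [bRec, PySem.Int.mod_eq_emod_of_pos (by norm_num : (0:Int) < 10 ^ 9 + 7), pvM]

theorem bridgeB (n : String) :
    substrings_alt n = bRec n.toList 0 0 0 := by
  unfold substrings_alt
  exact foldlB_aux n.toList 0 0 0

theorem aRec_selfmod (cs : List Char) : ∀ i res f, res % pvM = res →
    (aRec cs i res f) % pvM = aRec cs i res f := by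
  induction cs with
  | nil => intro i res f h; exact h
  | cons c cs ih =>
      intro i res f _
      exact ih _ _ _ (Int.emod_emod_of_dvd _ dvd_rfl)

theorem bRec_selfmod (cs : List Char) : ∀ s f total, total % pvM = total →
    (bRec cs s f total) % pvM = bRec cs s f total := by
  induction cs with
  | nil => intro s f total h; exact h
  | cons c cs ih =>
      intro s f total _
      exact ih _ _ _ (Int.emod_emod_of_dvd _ dvd_rfl)

theorem aRec_modeq (cs : List Char) : ∀ i res f res' f', res ≡ res' [ZMOD pvM] → f ≡ f' [ZMOD pvM] →
    aRec cs i res f ≡ res' + aV cs i f' [ZMOD pvM] := by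
  induction cs with
  | nil => intro i res f res' f' h _; simpa [aRec, aV] using h
  | cons c cs ih =>
      intro i res f res' f' hres hf
      have h1 : (res + (pyIntChar c - pyIntChar '0') * f * (i + 1)) % pvM
          ≡ res' + (pyIntChar c - pyIntChar '0') * f' * (i + 1) [ZMOD pvM] :=
        (Int.emod_emod_of_dvd _ dvd_rfl).trans
          (hres.add ((Int.ModEq.refl _).mul hf |>.mul (Int.ModEq.refl _)))
      have h2 : (f * 10 + 1) % pvM ≡ f' * 10 + 1 [ZMOD pvM] :=
        (Int.emod_emod_of_dvd _ dvd_rfl).trans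
          ((hf.mul (Int.ModEq.refl _)).add (Int.ModEq.refl _))
      have := ih (i - 1) _ _ _ _ h1 h2
      simpa [aRec, aV, add_assoc, mul_comm] using this
  
theorem bRec_modeq (cs : List Char) : ∀ s f total f' total', f ≡ f' [ZMOD pvM] → total ≡ total' [ZMOD pvM] →
    bRec cs s f total ≡ total' + bV cs s f' [ZMOD pvM] := by
  induction cs with
  | nil => intro s f total f' total' _ h; simpa [bRec, bV] using h
  | cons c cs ih =>
      intro s f total f' total' hf htotal
      have hf1 : (10 * f + (s + 1) * pyIntChar c) % pvM
          ≡ 10 * f' + (s + 1) * pyIntChar c [ZMOD pvM] :=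
        (Int.emod_emod_of_dvd _ dvd_rfl).trans
          (((Int.ModEq.refl _).mul hf).add (Int.ModEq.refl _))
      have ht1 : (total + (10 * f + (s + 1) * pyIntChar c) % pvM) % pvM
          ≡ total' + (10 * f' + (s + 1) * pyIntChar c) [ZMOD pvM] :=
        (Int.emod_emod_of_dvd _ dvd_rfl).trans (htotal.add hf1)
      have := ih (s + 1) _ _ _ _ hf1 ht1
      simpa [bRec, bV, add_assoc] using this

theorem upd_shift (k : Nat) : ∀ f, upd (k + 1) f = upd k (10 * f + 1) := by
  induction k with
  | zero => intro f; simp [upd]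
  | succ k ih =>
      intro f
      calc upd (k + 1 + 1) f = 10 * upd (k + 1) f + 1 := rfl
        _ = 10 * upd k (10 * f + 1) + 1 := by rw [ih]
        _ = upd (k + 1) (10 * f + 1) := rfl

theorem wSum_append (cs : List Char) : ∀ (s f : Int) (y : Char),
    wSum (cs ++ [y]) s f = wSum cs s (10 * f + 1) + (s + cs.length + 1) * pyIntChar y * f := by
  induction cs with
  | nil => intro s f y; simp [wSum, upd]
  | cons c cs ih =>
      intro s f y
      simp [wSum, ih, ← upd_shift]
      ring

theorem aV_eq_wSum (xs : List Char) : ∀ f, aV xs.reverse ((xs.length : Int) - 1) f = wSum xs 0 f := by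
  induction xs using List.reverseRecOn with
  | nil => intro f; simp [aV, wSum]
  | append_singleton ys y ih =>
      intro f
      have h0 : pyIntChar '0' = 0 := by decide
      rw [wSum_append]
      simp only [List.reverse_append, List.reverse_singleton, List.singleton_append, aV,
        List.length_append, List.length_singleton]
      push_cast
      rw [show (ys.length : Int) + 1 - 1 = (ys.length : Int) by ring]
      rw [show f * 10 + 1 = 10 * f + 1 by ring, ih, h0]
      ring

theorem bV_eq_wSum (cs : List Char) : ∀ (s f : Int), bV cs s f = f * (upd cs.length 1 - 1) + wSum cs s 1 := by
  induction cs with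
  | nil => intro s f; simp [bV, wSum, upd]
  | cons c cs ih =>
      intro s f
      simp [bV, wSum, ih, upd]
      ring

-- ===== VERDICT (by name: the statement is the Claim_ definition above) =====
theorem substrings_spec : Claim_equal_substrings := by
  unfold Claim_equal_substrings
  intro n _ _
  unfold Spec_substrings
  rw [bridgeA, bridgeB]
  have hA : aRec n.toList.reverse ((n.toList.length : Int) - 1) 0 1 = (wSum n.toList 0 1) % pvM := by
    have h1 := aRec_modeq n.toList.reverse ((n.toList.length : Int) - 1) 0 1 0 1
      (Int.ModEq.refl _) (Int.ModEq.refl _)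
    have h2 := aRec_selfmod n.toList.reverse ((n.toList.length : Int) - 1) 0 1 (by decide)
    rw [aV_eq_wSum] at h1
    unfold Int.ModEq at h1
    rw [h2] at h1
    simpa using h1
  have hB : bRec n.toList 0 0 0 = (wSum n.toList 0 1) % pvM := by
    have h1 := bRec_modeq n.toList 0 0 0 0 0 (Int.ModEq.refl _) (Int.ModEq.refl _)
    have h2 := bRec_selfmod n.toList 0 0 0 (by decide)
    rw [bV_eq_wSum] at h1
    unfold Int.ModEq at h1
    rw [h2] at h1
    simpa using h1
  rw [hA, hB]
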